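-- pv_equiv track=rewrite | github.com/KubinGH/logia-tryhard-saga | Ye Olde/Etap 3/2015/4.py | droga
-- ===== SOURCE A (Python) =====
-- class Building:
--     def __init__(self, width, height):
--         self.width, self.height = width, height
--
-- class Lizard:
--     def __init__(self):
--         self.x = self.y = 0
--         self.walked = 0
--
--     def cross(self, building):
--         if building.height != self.y:
--             self.walked += abs(building.height - self.y)
--             self.y = building.height
--         self.walked += abs(building.width)
--         self.x += building.width
--
--     def go_to_floor(self):
--         self.walked += abs(self.y)
--         self.y = 0
--
-- def is_seq(obj):
--     return isinstance(obj, (list, tuple))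
--
-- def droga(buildings):
--     buildings = [Building(*item) if is_seq(item) else Building(item, 0)
--                  for item in buildings]
--
--     tom = Lizard()
--     for building in buildings:
--         tom.cross(building)
--     tom.go_to_floor()
--
--     return tom.walked
-- ===== SOURCE B (Python) =====
-- def droga(buildings):
--     widths = [item[0] if isinstance(item, (list, tuple)) else item
--               for item in buildings]
--     heights = [item[1] if isinstance(item, (list, tuple)) else 0
--                for item in buildings]
--     # The zero-padded height path is closed (starts and ends at 0), so the
--     # total descent equals the total ascent: vertical walk = 2 * total ascent.
--     path = [0] + heights + [0]
--     climb = sum(max(b - a, 0) for a, b in zip(path, path[1:]))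
--     return sum(abs(w) for w in widths) + 2 * climb
-- ===== Notes on version B (the rewrite author's own statement) =====
-- stated objective: alternative
-- what changed: Replaces the stateful Lizard simulation (tracking position and adding |height change| per building) with a closed-path identity: answer = sum of |width| plus TWICE the total ascent (sum of positive height increments) of the zero-padded height path, using that on a closed path descents equal ascents; no absolute height difference is ever computed.
import Mathlib
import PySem

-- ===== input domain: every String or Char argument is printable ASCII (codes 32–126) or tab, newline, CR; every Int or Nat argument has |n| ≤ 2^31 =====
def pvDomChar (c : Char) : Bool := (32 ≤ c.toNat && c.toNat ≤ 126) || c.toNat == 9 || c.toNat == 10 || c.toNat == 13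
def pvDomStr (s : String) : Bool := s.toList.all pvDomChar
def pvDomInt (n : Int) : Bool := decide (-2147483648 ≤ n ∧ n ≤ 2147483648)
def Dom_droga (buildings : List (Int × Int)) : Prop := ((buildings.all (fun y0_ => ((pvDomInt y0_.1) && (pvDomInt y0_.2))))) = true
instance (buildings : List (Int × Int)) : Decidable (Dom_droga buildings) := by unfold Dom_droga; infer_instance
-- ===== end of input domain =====

-- B replaces A's stateful Lizard simulation by sum of |width| plus TWICE the total
-- ascent of the zero-padded height path (descents = ascents on a closed path);
-- objective: alternative algorithm, same cost.

-- ===== PORT A =====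
-- Lizard.cross: state is (y, walked); x is never read for the result, so omitted.
def drogaCross (st : Int × Int) (b : Int × Int) : Int × Int :=
  let st := if b.2 ≠ st.1 then (b.2, st.2 + |b.2 - st.1|) else st
  (st.1, st.2 + |b.1|)

def droga (buildings : List (Int × Int)) : Int :=
  let st := buildings.foldl drogaCross (0, 0)
  st.2 + |st.1|   -- go_to_floor

-- ===== PORT B =====
-- sum of max (h - prev) 0 over consecutive pairs of prev :: hs (Source B's zip-sum)
def drogaClimb (prev : Int) : List Int → Int
  | [] => 0
  | h :: t => max (h - prev) 0 + drogaClimb h t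

def droga_alt (buildings : List (Int × Int)) : Int :=
  (buildings.map (fun b => |b.1|)).sum
    + 2 * drogaClimb 0 (buildings.map Prod.snd ++ [0])

-- ===== PRECONDITION & SPEC =====
def Spec_droga (buildings : List (Int × Int)) (out : Int) : Prop := out = droga_alt buildings
instance (buildings : List (Int × Int)) (out : Int) : Decidable (Spec_droga buildings out) := by unfold Spec_droga; infer_instance

-- ===== CLAIM (what is proved, stated in full; the proofs are below) =====
def Claim_equal_droga : Prop := ∀ (buildings : List (Int × Int)), Dom_droga buildings → Spec_droga buildings (droga buildings)

-- ===== LEMMAS AND PROOFS =====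
theorem drogaCross_eq (y w : Int) (b : Int × Int) :
    drogaCross (y, w) b = (b.2, w + |b.2 - y| + |b.1|) := by
  unfold drogaCross
  by_cases h : b.2 = y
  · simp [h]
  · simp [h]

-- total variation of prev :: l (A's vertical walk, used only in the proof)
def drogaTV (prev : Int) : List Int → Int
  | [] => 0
  | h :: t => |h - prev| + drogaTV h t

theorem drogaTV_eq_two_climb (hs : List Int) : ∀ (prev : Int),
    drogaTV prev (hs ++ [0]) = 2 * drogaClimb prev (hs ++ [0]) + prev := by
  induction hs with
  | nil =>
    intro prev
    simp only [List.nil_append, drogaTV, drogaClimb]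
    rcases abs_cases ((0:Int) - prev) with ⟨h1, h2⟩ | ⟨h1, h2⟩ <;> omega
  | cons h t ih =>
    intro prev
    simp only [List.cons_append, drogaTV, drogaClimb, ih h]
    rcases abs_cases (h - prev) with ⟨h1, h2⟩ | ⟨h1, h2⟩ <;> omega

theorem droga_loop_eq (bs : List (Int × Int)) : ∀ (y w : Int),
    (bs.foldl drogaCross (y, w)).2 + |(bs.foldl drogaCross (y, w)).1|
      = w + (bs.map (fun b => |b.1|)).sum + drogaTV y (bs.map Prod.snd ++ [0]) := by
  induction bs with
  | nil =>
    intro y w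
    simp [drogaTV]
  | cons b t ih =>
    intro y w
    simp only [List.foldl_cons, drogaCross_eq, List.map_cons, List.sum_cons,
      List.cons_append, drogaTV, ih]
    ring

-- ===== VERDICT (by name: the statement is the Claim_ definition above) =====
theorem droga_spec : Claim_equal_droga := by
  intro bs _
  show droga bs = droga_alt bs
  unfold droga droga_alt
  have h := droga_loop_eq bs 0 0
  simp only [drogaTV_eq_two_climb] at h
  simpa using h
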